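-- pv_equiv track=rewrite | github.com/YurgenSlavniy/EducationRepo | python/educationCourseAll.py/Checio.py | nearest_value
-- ===== SOURCE A (Python) =====
-- def nearest_value(values: set, one: int) -> int:
--     lista = sorted(values)
--     for element in lista:
--         diff = abs(one - element)
--         try:
--             if diff < prevDiff:
--                 prevDiff = diff
--                 nearest = element
--         except UnboundLocalError:
--             prevDiff = diff
--             nearest = element
--     return nearest
-- ===== SOURCE B (Python) =====
-- def nearest_value(values: set, one: int) -> int:
--     return min(values, key=lambda x: (abs(one - x), x))
-- ===== Notes on version B (the rewrite author's own statement) =====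
-- stated objective: idiomatic
-- what changed: Replaces A's sort followed by a scan with an unbound-local sentinel by a single min() over the unsorted input keyed on the tuple (abs(one - x), x), whose lexicographic tie-break reproduces A's preference for the smaller element at equal distance.
-- outside the precondition, e.g. on nearest_value(set(), 5): A raises UnboundLocalError, B raises ValueError
import Mathlib
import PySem

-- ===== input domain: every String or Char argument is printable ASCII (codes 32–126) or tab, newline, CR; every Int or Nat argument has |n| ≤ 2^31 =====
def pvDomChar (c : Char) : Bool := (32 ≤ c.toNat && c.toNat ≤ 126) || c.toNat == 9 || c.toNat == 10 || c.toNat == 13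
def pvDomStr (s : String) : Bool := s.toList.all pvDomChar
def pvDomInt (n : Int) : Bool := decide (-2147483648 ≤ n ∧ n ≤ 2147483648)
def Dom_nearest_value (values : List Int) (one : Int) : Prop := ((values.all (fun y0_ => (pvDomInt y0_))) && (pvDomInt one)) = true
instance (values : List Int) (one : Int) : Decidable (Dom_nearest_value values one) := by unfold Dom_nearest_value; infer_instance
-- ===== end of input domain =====

-- B replaces A's sort-then-scan (with its unbound-local sentinel) by a single
-- min() over the unsorted input keyed on (abs(one - x), x); idiomatic, same results.

-- ===== PORT A =====
-- the loop body of A: try/except UnboundLocalError becomes a match on an Option state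
def nvStepA (one : Int) (acc : Option (Int × Int)) (element : Int) : Option (Int × Int) :=
  let diff := |one - element|
  match acc with
  | none => some (diff, element)                 -- UnboundLocalError branch: first assignment
  | some (prevDiff, nearest) =>
      if diff < prevDiff then some (diff, element) else some (prevDiff, nearest)

def nearest_value (values : List Int) (one : Int) : Int :=
  let lista := PySem.List.sorted values (fun x => x) false
  match lista.foldl (nvStepA one) none with
  | some (_, nearest) => nearest
  | none => 0                                    -- unreachable under Pre_ (values ≠ []); Python raises UnboundLocalError

-- ===== PORT B =====
def nearest_value_alt (values : List Int) (one : Int) : Int :=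
  match PySem.List.min2? values (fun x => |one - x|) (fun x => x) with
  | some m => m
  | none => 0                                    -- unreachable under Pre_ (values ≠ []); Python raises ValueError

-- ===== PRECONDITION & SPEC =====
-- Pre_ excludes only the empty input, on which both Pythons raise (A: UnboundLocalError, B: ValueError)
def Pre_nearest_value (values : List Int) (one : Int) : Prop := values ≠ []
instance (values : List Int) (one : Int) : Decidable (Pre_nearest_value values one) := by unfold Pre_nearest_value; infer_instance
def pvWitness_nearest_value : List Int × Int := ([3, 5], 4)

def Spec_nearest_value (values : List Int) (one : Int) (out : Int) : Prop := out = nearest_value_alt values one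
instance (values : List Int) (one : Int) (out : Int) : Decidable (Spec_nearest_value values one out) := by unfold Spec_nearest_value; infer_instance

-- ===== CLAIM (what is proved, stated in full; the proofs are below) =====
def Claim_equal_nearest_value : Prop := ∀ (values : List Int) (one : Int), Dom_nearest_value values one → Pre_nearest_value values one → Spec_nearest_value values one (nearest_value values one)

-- ===== LEMMAS AND PROOFS =====

-- lexicographic order on the key (|one - x|, x) shared by both characterisations
def nvLexLe (one a b : Int) : Prop :=
  |one - a| < |one - b| ∨ (|one - a| = |one - b| ∧ a ≤ b)

theorem nvLexLe_refl (one a : Int) : nvLexLe one a a := Or.inr ⟨rfl, le_refl a⟩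

theorem nvLexLe_trans {one a b c : Int} (h1 : nvLexLe one a b) (h2 : nvLexLe one b c) :
    nvLexLe one a c := by
  unfold nvLexLe at *; omega

theorem nvLexLe_antisymm {one a b : Int} (h1 : nvLexLe one a b) (h2 : nvLexLe one b a) :
    a = b := by
  unfold nvLexLe at *; omega

-- A's scan over a sorted suffix keeps the lexicographically least key seen so far
theorem foldA_spec (one : Int) (t : List Int) (m0 : Int)
    (hlb : ∀ y ∈ t, m0 ≤ y) (hp : t.Pairwise (· ≤ ·)) :
    ∃ m, t.foldl (nvStepA one) (some (|one - m0|, m0)) = some (|one - m|, m) ∧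
      (m = m0 ∨ m ∈ t) ∧ nvLexLe one m m0 ∧ ∀ y ∈ t, nvLexLe one m y := by
  induction t generalizing m0 with
  | nil => exact ⟨m0, rfl, Or.inl rfl, nvLexLe_refl one m0, by simp⟩
  | cons x t ih =>
    rcases List.pairwise_cons.mp hp with ⟨hx, hp'⟩
    have hm0x : m0 ≤ x := hlb x (List.mem_cons_self)
    simp only [List.foldl_cons]
    by_cases hcmp : |one - x| < |one - m0|
    · have hstep : nvStepA one (some (|one - m0|, m0)) x = some (|one - x|, x) := by
        simp [nvStepA, hcmp]
      rw [hstep]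
      obtain ⟨m, hfold, hmem, hle, hall⟩ := ih x hx hp'
      refine ⟨m, hfold, ?_, ?_, ?_⟩
      · rcases hmem with h | h
        · exact Or.inr (h ▸ List.mem_cons_self)
        · exact Or.inr (List.mem_cons_of_mem _ h)
      · exact nvLexLe_trans hle (Or.inl hcmp)
      · intro y hy
        rcases List.mem_cons.mp hy with rfl | hy
        · exact hle
        · exact hall y hy
    · have hstep : nvStepA one (some (|one - m0|, m0)) x = some (|one - m0|, m0) := by
        simp [nvStepA, hcmp]
      rw [hstep]
      have hlb' : ∀ y ∈ t, m0 ≤ y := fun y hy => le_trans hm0x (hx y hy)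
      obtain ⟨m, hfold, hmem, hle, hall⟩ := ih m0 hlb' hp'
      refine ⟨m, hfold, ?_, hle, ?_⟩
      · rcases hmem with h | h
        · exact Or.inl h
        · exact Or.inr (List.mem_cons_of_mem _ h)
      · intro y hy
        rcases List.mem_cons.mp hy with rfl | hy
        · exact nvLexLe_trans hle (by unfold nvLexLe at *; omega)
        · exact hall y hy

-- B's running minimum: the fold step inside min2? with keys |one - ·| and id
def nvStepB (one : Int) (acc : Option Int) (x : Int) : Option Int :=
  match acc with
  | none => some x
  | some m =>
    if (decide (|one - x| < |one - m|) ||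
        !decide (|one - m| < |one - x|) && decide (x < m)) = true then some x else some m

theorem foldB_spec (one : Int) (t : List Int) (m0 : Int) :
    ∃ m, t.foldl (nvStepB one) (some m0) = some m ∧ (m = m0 ∨ m ∈ t) ∧ nvLexLe one m m0 ∧ ∀ y ∈ t, nvLexLe one m y := by
  induction t generalizing m0 with
  | nil => exact ⟨m0, rfl, Or.inl rfl, nvLexLe_refl one m0, by simp⟩
  | cons x t ih =>
    simp only [List.foldl_cons]
    by_cases hcmp : (decide (|one - x| < |one - m0|) ||
        !decide (|one - m0| < |one - x|) && decide (x < m0)) = true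
    · have hstep : nvStepB one (some m0) x = some x := by simp only [nvStepB, hcmp, if_true]
      rw [hstep]
      obtain ⟨m, hfold, hmem, hle, hall⟩ := ih x
      have hxm0 : nvLexLe one x m0 := by
        simp only [Bool.or_eq_true, Bool.and_eq_true, Bool.not_eq_true', decide_eq_true_eq,
          decide_eq_false_iff_not] at hcmp
        unfold nvLexLe; omega
      refine ⟨m, hfold, ?_, nvLexLe_trans hle hxm0, ?_⟩
      · rcases hmem with h | h
        · exact Or.inr (h ▸ List.mem_cons_self)
        · exact Or.inr (List.mem_cons_of_mem _ h)
      · intro y hy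
        rcases List.mem_cons.mp hy with rfl | hy
        · exact hle
        · exact hall y hy
    · have hstep : nvStepB one (some m0) x = some m0 := by simp [nvStepB, hcmp]
      rw [hstep]
      obtain ⟨m, hfold, hmem, hle, hall⟩ := ih m0
      have hm0x : nvLexLe one m0 x := by
        simp only [Bool.or_eq_true, Bool.and_eq_true, Bool.not_eq_true', decide_eq_true_eq,
          decide_eq_false_iff_not] at hcmp
        unfold nvLexLe; omega
      refine ⟨m, hfold, ?_, hle, ?_⟩
      · rcases hmem with h | h
        · exact Or.inl h
        · exact Or.inr (List.mem_cons_of_mem _ h)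
      · intro y hy
        rcases List.mem_cons.mp hy with rfl | hy
        · exact nvLexLe_trans hle hm0x
        · exact hall y hy

theorem nearest_value_alt_spec (values : List Int) (one : Int) (hne : values ≠ []) :
    ∃ m, nearest_value_alt values one = m ∧ m ∈ values ∧ ∀ y ∈ values, nvLexLe one m y := by
  obtain ⟨v, t, rfl⟩ := List.exists_cons_of_ne_nil hne
  obtain ⟨m, hfold, hmem, hle, hall⟩ := foldB_spec one t v
  refine ⟨m, ?_, ?_, ?_⟩
  · have hmin : PySem.List.min2? (v :: t) (fun x => |one - x|) (fun x => x)
        = List.foldl (nvStepB one) (some v) t := by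
      show List.foldl _ (some v) t = _
      apply PySem.List.foldl_congr_mem
      intro acc x _
      cases acc <;> rfl
    simp only [nearest_value_alt, hmin, hfold]
  · rcases hmem with rfl | h
    · exact List.mem_cons_self
    · exact List.mem_cons_of_mem _ h
  · intro y hy
    rcases List.mem_cons.mp hy with rfl | hy
    · exact hle
    · exact hall y hy

theorem nearest_value_A_spec (values : List Int) (one : Int) (hne : values ≠ []) :
    ∃ m, nearest_value values one = m ∧ m ∈ values ∧ ∀ y ∈ values, nvLexLe one m y := by
  have hperm := PySem.List.sorted_perm values (fun x => x) false
  have hsne : PySem.List.sorted values (fun x => x) false ≠ [] := by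
    intro h
    exact hne ((PySem.List.sorted_eq_nil_iff values (fun x => x) false).mp h)
  obtain ⟨m0, t, heq⟩ := List.exists_cons_of_ne_nil hsne
  have hpw : (PySem.List.sorted values (fun x => x) false).Pairwise (· ≤ ·) := by
    have := PySem.List.sorted_pairwise values (fun x => x)
    simpa using this
  rw [heq] at hpw hperm
  rcases List.pairwise_cons.mp hpw with ⟨hlb, hp'⟩
  obtain ⟨m, hfold, hmem, hle, hall⟩ := foldA_spec one t m0 hlb hp'
  have hmemc : m ∈ m0 :: t := by
    rcases hmem with rfl | h
    · exact List.mem_cons_self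
    · exact List.mem_cons_of_mem _ h
  refine ⟨m, ?_, hperm.mem_iff.mp hmemc, ?_⟩
  · simp only [nearest_value, heq, List.foldl_cons]
    have h0 : nvStepA one none m0 = some (|one - m0|, m0) := rfl
    rw [h0, hfold]
  · intro y hy
    have hy' : y ∈ m0 :: t := hperm.mem_iff.mpr hy
    rcases List.mem_cons.mp hy' with rfl | hy''
    · exact hle
    · exact hall y hy''

-- ===== VERDICT (by name: the statement is the Claim_ definition above) =====
theorem nearest_value_spec : Claim_equal_nearest_value := by
  intro values one _ hpre
  unfold Spec_nearest_value
  obtain ⟨mA, hA, hAmem, hAall⟩ := nearest_value_A_spec values one hpre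
  obtain ⟨mB, hB, hBmem, hBall⟩ := nearest_value_alt_spec values one hpre
  rw [hA, hB]
  exact nvLexLe_antisymm (hAall mB hBmem) (hBall mA hAmem)
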